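-- pv_equiv track=rewrite | github.com/EAGLE-BPN/eagle-wiki | eagle-aio.py | replaceSuperscript
-- ===== SOURCE A (Python) =====
-- def replaceSuperscript(text):
-- 	superRep = [
-- 		(u'1', u'¹'),
-- 		(u'2', u'²'),
-- 		(u'3', u'³'),
-- 		(u'4', u'⁴'),
-- 		(u'5', u'⁵'),
-- 		(u'6', u'⁶'),
-- 		(u'7', u'⁷'),
-- 		(u'8', u'⁸'),
-- 		(u'9', u'⁹'),
-- 		(u'0', u'⁰'),
-- 	]
-- 	for i in superRep:
-- 		text = text.replace(i[0], u'%sup%' + i[1])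
-- 	return text
-- ===== SOURCE B (Python) =====
-- def replaceSuperscript(text):
-- 	res = u''
-- 	for c in text:
-- 		if u'0' <= c <= u'9':
-- 			d = ord(c) - ord(u'0')
-- 			if d == 1:
-- 				s = u'\u00b9'
-- 			elif d == 2:
-- 				s = u'\u00b2'
-- 			elif d == 3:
-- 				s = u'\u00b3'
-- 			else:
-- 				s = chr(0x2070 + d)
-- 			res += u'%sup%' + s
-- 		else:
-- 			res += c
-- 	return res
-- ===== Notes on version B (the rewrite author's own statement) =====
-- stated objective: alternative
-- what changed: Replaces ten sequential full-string .replace passes by a single accumulator loop over the characters that detects digits by range comparison and computes the superscript character arithmetically from the code point (with three special cases for 1-3).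
import Mathlib
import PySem

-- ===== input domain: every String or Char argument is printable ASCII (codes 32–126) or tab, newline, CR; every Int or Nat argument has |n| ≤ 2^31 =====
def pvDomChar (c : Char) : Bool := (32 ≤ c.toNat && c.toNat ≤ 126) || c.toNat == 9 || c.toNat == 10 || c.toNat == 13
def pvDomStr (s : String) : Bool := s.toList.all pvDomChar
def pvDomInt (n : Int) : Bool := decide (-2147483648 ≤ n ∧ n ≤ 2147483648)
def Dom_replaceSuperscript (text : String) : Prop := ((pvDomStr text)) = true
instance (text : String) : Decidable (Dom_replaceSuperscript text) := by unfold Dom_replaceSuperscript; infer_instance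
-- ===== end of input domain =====

-- B replaces A's ten sequential full-string .replace passes by one accumulator loop over the
-- characters, detecting digits by range comparison and computing the superscript character
-- arithmetically from the code point; objective: alternative (a different-shaped traversal).

-- ===== PORT A =====
-- the superRep pair list of A, verbatim
def supRep : List (Char × String) :=
  [('1', "¹"), ('2', "²"), ('3', "³"), ('4', "⁴"), ('5', "⁵"),
   ('6', "⁶"), ('7', "⁷"), ('8', "⁸"), ('9', "⁹"), ('0', "⁰")]

def replaceSuperscript (text : String) : String :=
  supRep.foldl (fun t p => PySem.Str.replace t (String.singleton p.1) ("%sup%" ++ p.2)) text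

-- ===== PORT B =====
-- Source B's inner if/elif chain computing the superscript char for digit value d (chr(0x2070+d) default)
def supChar (d : Nat) : Char :=
  if d = 1 then '¹' else if d = 2 then '²' else if d = 3 then '³' else Char.ofNat (0x2070 + d)

-- Source B's loop: res starts empty, each character appends either '%sup%'+sup or itself
def replaceSuperscript_alt (text : String) : String :=
  String.ofList (text.toList.foldl (fun res c =>
    res ++ (if '0' ≤ c ∧ c ≤ '9'
            then "%sup%".toList ++ [supChar (c.toNat - '0'.toNat)]
            else [c])) [])

-- ===== PRECONDITION & SPEC =====
def Spec_replaceSuperscript (text : String) (out : String) : Prop := out = replaceSuperscript_alt text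
instance (text : String) (out : String) : Decidable (Spec_replaceSuperscript text out) := by unfold Spec_replaceSuperscript; infer_instance

-- ===== CLAIM (what is proved, stated in full; the proofs are below) =====
def Claim_equal_replaceSuperscript : Prop := ∀ (text : String), Dom_replaceSuperscript text → Spec_replaceSuperscript text (replaceSuperscript text)

-- ===== LEMMAS AND PROOFS =====

-- single-character substitution: what text.replace(d, r) does per character
def subst (d : Char) (r : List Char) (c : Char) : List Char := if c = d then r else [c]

-- B's per-character contribution (the body of the loop)
def bChar (c : Char) : List Char :=
  if '0' ≤ c ∧ c ≤ '9' then "%sup%".toList ++ [supChar (c.toNat - '0'.toNat)] else [c]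

theorem go_single (d : Char) (r : List Char) :
    ∀ (fuel : Nat) (l acc : List Char), l.length ≤ fuel →
    PySem.Chars.replace.go [d] r fuel l acc = acc.reverse ++ l.flatMap (subst d r) := by
  intro fuel
  induction fuel with
  | zero => intro l acc h; simp at h; subst h; simp [PySem.Chars.replace.go]
  | succ f ih =>
    intro l acc h
    cases l with
    | nil => simp [PySem.Chars.replace.go]
    | cons c t =>
      rw [PySem.Chars.replace.go]
      by_cases hc : c = d
      · subst hc
        simp [List.isPrefixOf, subst, ih t _ (by simpa using h)]
      · have hp : [d].isPrefixOf (c :: t) = false := by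
          simp [List.isPrefixOf]
          exact fun h' => absurd h'.symm hc
        simp [hp, subst, hc, ih t _ (by simpa using h)]

-- text.replace(d, r) with a one-character pattern is a per-character flatMap
theorem replace_single (d : Char) (r s : List Char) :
    PySem.Chars.replace s [d] r = s.flatMap (subst d r) := by
  rw [PySem.Chars.replace]
  simpa using go_single d r s.length s [] le_rfl

-- the per-character effect of A's chain of ten replaces
def chainF (c : Char) : List Char :=
  (subst '1' ("%sup%".toList ++ "¹".toList) c).flatMap fun x =>
  (subst '2' ("%sup%".toList ++ "²".toList) x).flatMap fun x =>
  (subst '3' ("%sup%".toList ++ "³".toList) x).flatMap fun x =>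
  (subst '4' ("%sup%".toList ++ "⁴".toList) x).flatMap fun x =>
  (subst '5' ("%sup%".toList ++ "⁵".toList) x).flatMap fun x =>
  (subst '6' ("%sup%".toList ++ "⁶".toList) x).flatMap fun x =>
  (subst '7' ("%sup%".toList ++ "⁷".toList) x).flatMap fun x =>
  (subst '8' ("%sup%".toList ++ "⁸".toList) x).flatMap fun x =>
  (subst '9' ("%sup%".toList ++ "⁹".toList) x).flatMap
  (subst '0' ("%sup%".toList ++ "⁰".toList))

theorem char_eq_of_toNat (c d : Char) (h : c.toNat = d.toNat) : c = d := by
  apply Char.ext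
  exact UInt32.toNat_inj.mp h

theorem digit_cases (c : Char) (h : '0' ≤ c ∧ c ≤ '9') :
    c = '0' ∨ c = '1' ∨ c = '2' ∨ c = '3' ∨ c = '4' ∨
    c = '5' ∨ c = '6' ∨ c = '7' ∨ c = '8' ∨ c = '9' := by
  obtain ⟨h1, h2⟩ := h
  rw [Char.le_def] at h1 h2
  have hl : 48 ≤ c.toNat := h1
  have hr : c.toNat ≤ 57 := h2
  have : c.toNat = 48 ∨ c.toNat = 49 ∨ c.toNat = 50 ∨ c.toNat = 51 ∨ c.toNat = 52 ∨
      c.toNat = 53 ∨ c.toNat = 54 ∨ c.toNat = 55 ∨ c.toNat = 56 ∨ c.toNat = 57 := by omega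
  rcases this with h|h|h|h|h|h|h|h|h|h <;>
    [exact Or.inl (char_eq_of_toNat _ _ h);
     exact Or.inr (Or.inl (char_eq_of_toNat _ _ h));
     exact Or.inr (Or.inr (Or.inl (char_eq_of_toNat _ _ h)));
     exact Or.inr (Or.inr (Or.inr (Or.inl (char_eq_of_toNat _ _ h))));
     exact Or.inr (Or.inr (Or.inr (Or.inr (Or.inl (char_eq_of_toNat _ _ h)))));
     exact Or.inr (Or.inr (Or.inr (Or.inr (Or.inr (Or.inl (char_eq_of_toNat _ _ h))))));
     exact Or.inr (Or.inr (Or.inr (Or.inr (Or.inr (Or.inr (Or.inl (char_eq_of_toNat _ _ h)))))));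
     exact Or.inr (Or.inr (Or.inr (Or.inr (Or.inr (Or.inr (Or.inr (Or.inl (char_eq_of_toNat _ _ h))))))));
     exact Or.inr (Or.inr (Or.inr (Or.inr (Or.inr (Or.inr (Or.inr (Or.inr (Or.inl (char_eq_of_toNat _ _ h)))))))));
     exact Or.inr (Or.inr (Or.inr (Or.inr (Or.inr (Or.inr (Or.inr (Or.inr (Or.inr (char_eq_of_toNat _ _ h)))))))))]

theorem chainF_eq (c : Char) : chainF c = bChar c := by
  by_cases hd : '0' ≤ c ∧ c ≤ '9'
  · rcases digit_cases c hd with h|h|h|h|h|h|h|h|h|h <;> subst h <;> decide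
  · have h1 : c ≠ '1' := fun h => hd (by subst h; decide)
    have h2 : c ≠ '2' := fun h => hd (by subst h; decide)
    have h3 : c ≠ '3' := fun h => hd (by subst h; decide)
    have h4 : c ≠ '4' := fun h => hd (by subst h; decide)
    have h5 : c ≠ '5' := fun h => hd (by subst h; decide)
    have h6 : c ≠ '6' := fun h => hd (by subst h; decide)
    have h7 : c ≠ '7' := fun h => hd (by subst h; decide)
    have h8 : c ≠ '8' := fun h => hd (by subst h; decide)
    have h9 : c ≠ '9' := fun h => hd (by subst h; decide)
    have h0 : c ≠ '0' := fun h => hd (by subst h; decide)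
    simp [chainF, subst, bChar, hd, h1, h2, h3, h4, h5, h6, h7, h8, h9, h0]

theorem toList_eq (text : String) :
    (replaceSuperscript text).toList = (replaceSuperscript_alt text).toList := by
  have hA : (replaceSuperscript text).toList = text.toList.flatMap chainF := by
    simp only [replaceSuperscript, supRep, List.foldl, PySem.Str.toList_replace,
      String.toList_singleton, String.toList_append]
    simp only [replace_single, List.flatMap_assoc]
    exact congrArg (fun f => List.flatMap f text.toList) (funext fun c => rfl)
  have hB : (replaceSuperscript_alt text).toList = text.toList.flatMap bChar := by
    simp only [replaceSuperscript_alt]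
    rw [PySem.List.foldl_append_eq_flatMap]
    simp only [List.nil_append, String.toList_ofList]
    rfl
  rw [hA, hB]
  exact congrArg (fun f => List.flatMap f text.toList) (funext chainF_eq)

-- ===== VERDICT (by name: the statement is the Claim_ definition above) =====
theorem replaceSuperscript_spec : Claim_equal_replaceSuperscript := by
  intro text _
  unfold Spec_replaceSuperscript
  exact String.toList_inj.mp (toList_eq text)
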